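-- pv_equiv track=rewrite | github.com/negikaran7/Django_site | codingbat/String-2/cat_dog.py | cat_dog
-- ===== SOURCE A (Python) =====
-- def cat_dog(str):
--     count_c = 0
--     count_d = 0
--     for i in range(len(str)-1):
--         if str[i:i+3] == 'cat':
--             count_c += 1
--         elif str[i:i+3] == 'dog':
--             count_d += 1
--     return count_c == count_d
-- ===== SOURCE B (Python) =====
-- def cat_dog(str):
--     # Character automaton: single pass over characters keeping the last two
--     # characters as lookbehind and one signed balance (+1 per 'cat', -1 per 'dog').
--     bal = 0
--     p2 = p1 = None
--     for c in str:
--         if p2 == 'c' and p1 == 'a' and c == 't':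
--             bal += 1
--         elif p2 == 'd' and p1 == 'o' and c == 'g':
--             bal -= 1
--         p2, p1 = p1, c
--     return bal == 0
-- ===== Notes on version B (the rewrite author's own statement) =====
-- stated objective: alternative
-- what changed: Replaced the indexed slicing loop with two counters by a character-level automaton: one pass over the characters keeping the last two characters as lookbehind state and a single signed balance (+1 on completing 'cat', -1 on 'dog'), returning balance == 0; no per-index slice objects are built.
import Mathlib
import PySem

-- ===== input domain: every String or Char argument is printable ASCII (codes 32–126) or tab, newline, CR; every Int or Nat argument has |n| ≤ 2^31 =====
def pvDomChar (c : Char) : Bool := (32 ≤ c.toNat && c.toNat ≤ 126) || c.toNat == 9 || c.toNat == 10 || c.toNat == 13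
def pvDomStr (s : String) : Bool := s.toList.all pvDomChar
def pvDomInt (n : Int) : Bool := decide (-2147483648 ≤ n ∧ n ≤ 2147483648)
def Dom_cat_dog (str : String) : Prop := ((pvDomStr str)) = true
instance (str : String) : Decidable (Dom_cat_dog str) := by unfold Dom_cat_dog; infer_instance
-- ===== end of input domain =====

-- B replaces A's indexed slicing loop with two counters by a one-pass character
-- automaton keeping the last two characters and one signed balance (alternative).


-- ===== PORT A =====
-- count_c/count_d loop over i in range(len(str)-1), testing str[i:i+3]
def pvLoopA (str : String) : Int × Int :=
  (PySem.List.pyRange 0 (PySem.Str.len str - 1) 1).foldl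
    (fun (acc : Int × Int) i =>
      if PySem.Str.slice str (some i) (some (i + 3)) == "cat" then (acc.1 + 1, acc.2)
      else if PySem.Str.slice str (some i) (some (i + 3)) == "dog" then (acc.1, acc.2 + 1)
      else (acc.1, acc.2)) (0, 0)

def cat_dog (str : String) : Bool := (pvLoopA str).1 == (pvLoopA str).2

-- ===== PORT B =====
-- one pass over the characters; state = (p2, p1, bal): last two chars and the balance
def cat_dog_alt (str : String) : Bool :=
  (str.toList.foldl
    (fun (s : Option Char × Option Char × Int) c =>
      if s.1 = some 'c' ∧ s.2.1 = some 'a' ∧ c = 't' then (s.2.1, some c, s.2.2 + 1)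
      else if s.1 = some 'd' ∧ s.2.1 = some 'o' ∧ c = 'g' then (s.2.1, some c, s.2.2 - 1)
      else (s.2.1, some c, s.2.2)) (none, none, 0)).2.2 == 0

-- ===== PRECONDITION & SPEC =====
def Spec_cat_dog (str : String) (out : Bool) : Prop := out = cat_dog_alt str
instance (str : String) (out : Bool) : Decidable (Spec_cat_dog str out) := by unfold Spec_cat_dog; infer_instance

-- ===== CLAIM (what is proved, stated in full; the proofs are below) =====
def Claim_equal_cat_dog : Prop := ∀ (str : String), Dom_cat_dog str → Spec_cat_dog str (cat_dog str)

-- ===== LEMMAS AND PROOFS =====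

-- number of indices j of cs at which p starts (overlapping, one per position)
def pvOcc (p : List Char) : List Char → Nat
  | [] => 0
  | c :: t => (if p.isPrefixOf (c :: t) then 1 else 0) + pvOcc p t

theorem pvOcc_eq_countP_range (p : List Char) (cs : List Char) :
    (List.range cs.length).countP (fun j => p.isPrefixOf (cs.drop j)) = pvOcc p cs := by
  induction cs with
  | nil => simp [pvOcc]
  | cons c t ih =>
    simp only [List.length_cons, List.range_succ_eq_map, List.countP_cons, List.countP_map, pvOcc]
    rw [← ih]
    simp [Function.comp_def, Nat.add_comm]

-- the window at position j matches p (length 3) iff slice [j:j+3] equals p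
theorem window_eq (cs : List Char) (p : List Char) (hp3 : p.length = 3) (j : Nat) :
    ((cs.drop j).take 3 = p) ↔ p.isPrefixOf (cs.drop j) := by
  rw [List.isPrefixOf_iff_prefix, List.prefix_iff_eq_take, hp3]
  exact eq_comm

-- A's countP over range (n-1) equals the countP over range n (the last window is too short)
theorem countP_range_pred (cs : List Char) (p : List Char) (hp3 : p.length = 3) :
    (List.range (cs.length - 1)).countP (fun j => p.isPrefixOf (cs.drop j)) =
    (List.range cs.length).countP (fun j => p.isPrefixOf (cs.drop j)) := by
  cases hn : cs.length with
  | zero => simp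
  | succ m =>
    have : List.range (m + 1) = List.range m ++ [m] := List.range_succ
    rw [this, List.countP_append]
    have hlast : p.isPrefixOf (cs.drop m) = false := by
      have hlen : (cs.drop m).length = 1 := by simp [hn]
      by_contra hc
      have hc' : p.isPrefixOf (cs.drop m) = true := by
        cases h' : p.isPrefixOf (cs.drop m) <;> simp_all
      rw [List.isPrefixOf_iff_prefix] at hc'
      have := hc'.length_le
      omega
    simp [hlast]

theorem countA (str ps : String) (hp3 : ps.toList.length = 3) :
    (PySem.List.pyRange 0 (PySem.Str.len str - 1) 1).countP
      (fun i => PySem.Str.slice str (some i) (some (i + 3)) == ps)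
    = pvOcc ps.toList str.toList := by
  rw [PySem.Str.len_eq, PySem.List.pyRange_one, List.countP_map]
  have hn : ((str.toList.length : Int) - 1 - 0).toNat = str.toList.length - 1 := by omega
  rw [hn]
  have step : ∀ k ∈ List.range (str.toList.length - 1),
      (((fun i => PySem.Str.slice str (some i) (some (i + 3)) == ps) ∘ (fun k : Nat => 0 + (k : Int))) k = true)
      ↔ (ps.toList.isPrefixOf (str.toList.drop k) = true) := by
    intro k _
    simp only [Function.comp_apply, zero_add]
    rw [show (PySem.Str.slice str (some (k : Int)) (some ((k : Int) + 3)) == ps)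
        = decide ((PySem.Str.slice str (some (k : Int)) (some ((k : Int) + 3))).toList = ps.toList) from by
      rw [show ∀ a b : String, (a == b) = decide (a = b) from fun _ _ => rfl]
      simp [String.ext_iff]]
    rw [PySem.Str.toList_slice, PySem.Chars.slice_eq_listSlice,
        PySem.List.slice_toNat _ (by positivity) (by positivity)]
    have h1 : ((k : Int) + 3).toNat - k = 3 := by omega
    simp only [Int.toNat_natCast, h1]
    rw [show ∀ b : Bool, (decide (List.take 3 (List.drop k str.toList) = ps.toList) = b) ↔
        ((List.take 3 (List.drop k str.toList) = ps.toList) = (b = true)) from by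
      intro b; cases b <;> simp]
    rw [window_eq _ _ hp3]
    simp
  rw [List.countP_congr step, countP_range_pred _ _ hp3, pvOcc_eq_countP_range]

theorem cat_dog_eq (str : String) :
    cat_dog str = ((pvOcc ['c','a','t'] str.toList : Int) == (pvOcc ['d','o','g'] str.toList : Int)) := by
  unfold cat_dog pvLoopA
  have hf : (fun (acc : Int × Int) i =>
      if PySem.Str.slice str (some i) (some (i + 3)) == "cat" then (acc.1 + 1, acc.2)
      else if PySem.Str.slice str (some i) (some (i + 3)) == "dog" then (acc.1, acc.2 + 1)
      else (acc.1, acc.2))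
    = (fun (acc : Int × Int) i =>
      ((fun (a : Int) i => if PySem.Str.slice str (some i) (some (i + 3)) == "cat" then a + 1
        else if PySem.Str.slice str (some i) (some (i + 3)) == "dog" then a else a) acc.1 i,
       (fun (a : Int) i => if PySem.Str.slice str (some i) (some (i + 3)) == "cat" then a
        else if PySem.Str.slice str (some i) (some (i + 3)) == "dog" then a + 1 else a) acc.2 i)) := by
    funext acc i
    by_cases h1 : PySem.Str.slice str (some i) (some (i + 3)) == "cat" <;>
      by_cases h2 : PySem.Str.slice str (some i) (some (i + 3)) == "dog" <;>
      simp [h1, h2]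
  rw [hf, PySem.List.foldl_prod_mk
    (f := fun (a : Int) i => if PySem.Str.slice str (some i) (some (i + 3)) == "cat" then a + 1
      else if PySem.Str.slice str (some i) (some (i + 3)) == "dog" then a else a)
    (g := fun (a : Int) i => if PySem.Str.slice str (some i) (some (i + 3)) == "cat" then a
      else if PySem.Str.slice str (some i) (some (i + 3)) == "dog" then a + 1 else a)]
  simp only [ite_self]
  have hg : ∀ (l : List Int) (a : Int),
      l.foldl (fun (a : Int) i => if PySem.Str.slice str (some i) (some (i + 3)) == "cat" then a
        else if PySem.Str.slice str (some i) (some (i + 3)) == "dog" then a + 1 else a) a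
      = a + (l.countP (fun i => PySem.Str.slice str (some i) (some (i + 3)) == "dog") : Int) := by
    intro l a
    rw [← PySem.List.foldl_if_add_one]
    apply PySem.List.foldl_congr_mem
    intro acc x _
    by_cases h1 : PySem.Str.slice str (some x) (some (x + 3)) == "dog"
    · have h2 : (PySem.Str.slice str (some x) (some (x + 3)) == "cat") = false := by
        rcases h3 : PySem.Str.slice str (some x) (some (x + 3)) == "cat" with _ | _
        · rfl
        · exfalso
          have e1 := beq_iff_eq.mp h1
          have e2 := beq_iff_eq.mp h3
          rw [e2] at e1; simp at e1
      simp [h1, h2]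
    · simp [h1]
  rw [PySem.List.foldl_if_add_one, hg]
  rw [countA str "cat" (by decide), countA str "dog" (by decide)]
  simp

-- (a == b) for Char, with the arguments of the equality swapped
theorem pvBeqSwap (a b : Char) : (a == b) = decide (b = a) := by
  by_cases h : b = a
  · subst h; simp
  · have h2 : ¬a = b := fun e => h e.symm
    simp [h, h2]

-- B-side: the net contribution of the remaining chars given lookbehind (p2, p1)
def pvDiff3 : Option Char → Option Char → List Char → Int
  | _, _, [] => 0
  | p2, p1, c :: t =>
    (if p2 = some 'c' ∧ p1 = some 'a' ∧ c = 't' then 1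
     else if p2 = some 'd' ∧ p1 = some 'o' ∧ c = 'g' then -1 else 0) + pvDiff3 p1 (some c) t

-- occurrence-position balance over the whole list
def pvDiff : List Char → Int
  | c1 :: c2 :: c3 :: t =>
    (if [c1, c2, c3] = ['c', 'a', 't'] then 1
     else if [c1, c2, c3] = ['d', 'o', 'g'] then -1 else 0) + pvDiff (c2 :: c3 :: t)
  | _ => 0

theorem foldB_eq (l : List Char) : ∀ (p2 p1 : Option Char) (a : Int),
    (l.foldl
      (fun (s : Option Char × Option Char × Int) c =>
        if s.1 = some 'c' ∧ s.2.1 = some 'a' ∧ c = 't' then (s.2.1, some c, s.2.2 + 1)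
        else if s.1 = some 'd' ∧ s.2.1 = some 'o' ∧ c = 'g' then (s.2.1, some c, s.2.2 - 1)
        else (s.2.1, some c, s.2.2)) (p2, p1, a)).2.2 = a + pvDiff3 p2 p1 l := by
  induction l with
  | nil => intro p2 p1 a; simp [pvDiff3]
  | cons c t ih =>
    intro p2 p1 a
    simp only [List.foldl_cons, pvDiff3]
    by_cases h1 : p2 = some 'c' ∧ p1 = some 'a' ∧ c = 't'
    · simp only [if_pos h1, ih]; ring
    · by_cases h2 : p2 = some 'd' ∧ p1 = some 'o' ∧ c = 'g'
      · simp only [if_neg h1, if_pos h2, ih]; ring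
      · simp only [if_neg h1, if_neg h2, ih]; ring

theorem pvDiff3_some (l : List Char) : ∀ (a b : Char),
    pvDiff3 (some a) (some b) l = pvDiff (a :: b :: l) := by
  induction l with
  | nil => intro a b; simp [pvDiff3, pvDiff]
  | cons c t ih =>
    intro a b
    simp only [pvDiff3, ih, pvDiff, Option.some.injEq, List.cons.injEq, and_true]

theorem pvDiff3_none (l : List Char) :
    pvDiff3 none none l = pvDiff l := by
  cases l with
  | nil => rfl
  | cons b t =>
    cases t with
    | nil => simp [pvDiff3, pvDiff]
    | cons c u =>
      simp only [pvDiff3, pvDiff3_some]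
      norm_num
      cases u <;> simp [pvDiff]

theorem pvDiff_eq_occ (cs : List Char) :
    pvDiff cs = (pvOcc ['c', 'a', 't'] cs : Int) - (pvOcc ['d', 'o', 'g'] cs : Int) := by
  induction cs with
  | nil => simp [pvDiff, pvOcc]
  | cons c1 t ih =>
    match t with
    | [] => simp [pvDiff, pvOcc, List.isPrefixOf]
    | [c2] => simp [pvDiff, pvOcc, List.isPrefixOf]
    | c2 :: c3 :: u =>
      simp only [pvDiff, pvOcc, ih]
      have hcat : (['c','a','t'].isPrefixOf (c1 :: c2 :: c3 :: u)) = decide ([c1,c2,c3] = ['c','a','t']) := by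
        simp [List.isPrefixOf, pvBeqSwap]
      have hdog : (['d','o','g'].isPrefixOf (c1 :: c2 :: c3 :: u)) = decide ([c1,c2,c3] = ['d','o','g']) := by
        simp [List.isPrefixOf, pvBeqSwap]
      rw [hcat, hdog]
      by_cases h1 : [c1,c2,c3] = ['c','a','t']
      · have h2 : ¬ [c1,c2,c3] = ['d','o','g'] := by rw [h1]; decide
        simp [h1]
        ring
      · by_cases h2 : [c1,c2,c3] = ['d','o','g']
        · simp [h2]; ring
        · simp [h1, h2]

-- ===== VERDICT (by name: the statement is the Claim_ definition above) =====
theorem cat_dog_spec : Claim_equal_cat_dog := by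
  intro str _
  unfold Spec_cat_dog cat_dog_alt
  rw [cat_dog_eq, foldB_eq, pvDiff3_none, pvDiff_eq_occ]
  simp only [zero_add]
  have : ((pvOcc ['c','a','t'] str.toList : Int) = (pvOcc ['d','o','g'] str.toList : Int))
      ↔ ((pvOcc ['c','a','t'] str.toList : Int) - (pvOcc ['d','o','g'] str.toList : Int) = 0) := by omega
  simp [this]
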